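-- pv_equiv track=rewrite | github.com/psycho-pomp/CodeChef | FLOW015.py | Odd_days
-- ===== SOURCE A (Python) =====
-- def Odd_days(x,n):
--     odd_days=0
--     for i in range(x,n):
--         if (i%4==0 and i%100!=0 ) or i%400==0:
--             odd_days+=2
--         else:
--             odd_days+=1
--     return odd_days
-- ===== SOURCE B (Python) =====
-- def Odd_days(x, n):
--     # Closed form: (n-x) ordinary days plus one extra day per leap year in [x, n),
--     # counted by floor-division multiple counts.
--     if n <= x:
--         return 0
--     def mult(k):
--         return (n - 1) // k - (x - 1) // k
--     return (n - x) + mult(4) - mult(100) + mult(400)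
-- ===== Notes on version B (the rewrite author's own statement) =====
-- stated objective: faster
-- what changed: Replaces the per-year loop with an O(1) closed form: (n-x) plus leap-year count in [x,n) computed via floor-division multiple counts for 4, 100 and 400.
import Mathlib
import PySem

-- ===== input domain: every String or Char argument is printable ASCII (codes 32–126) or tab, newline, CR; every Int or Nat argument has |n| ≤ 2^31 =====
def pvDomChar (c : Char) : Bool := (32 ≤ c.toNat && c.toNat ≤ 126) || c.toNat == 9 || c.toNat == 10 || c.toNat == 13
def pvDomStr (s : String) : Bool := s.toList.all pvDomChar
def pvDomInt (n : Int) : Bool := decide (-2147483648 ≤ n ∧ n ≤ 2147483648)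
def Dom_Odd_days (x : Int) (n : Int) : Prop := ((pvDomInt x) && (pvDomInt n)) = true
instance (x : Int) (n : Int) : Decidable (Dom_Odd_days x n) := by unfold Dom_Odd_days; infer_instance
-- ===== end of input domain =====

-- B replaces A's per-year loop by an O(1) closed form (floor-division leap counting).

-- ===== PORT A =====
def Odd_days (x : Int) (n : Int) : Int :=
  (PySem.List.pyRange x n 1).foldl
    (fun odd_days i =>
      if ((PySem.Int.mod i 4 == 0) && !(PySem.Int.mod i 100 == 0)) || (PySem.Int.mod i 400 == 0)
      then odd_days + 2 else odd_days + 1) 0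

-- ===== PORT B =====
def Odd_days_alt (x : Int) (n : Int) : Int :=
  if n ≤ x then 0
  else
    let mult := fun (k : Int) =>
      PySem.Int.floordiv (n - 1) k - PySem.Int.floordiv (x - 1) k
    (n - x) + mult 4 - mult 100 + mult 400

-- ===== PRECONDITION & SPEC =====
def Spec_Odd_days (x : Int) (n : Int) (out : Int) : Prop := out = Odd_days_alt x n
instance (x : Int) (n : Int) (out : Int) : Decidable (Spec_Odd_days x n out) := by unfold Spec_Odd_days; infer_instance

-- ===== CLAIM (what is proved, stated in full; the proofs are below) =====
def Claim_equal_Odd_days : Prop := ∀ (x : Int) (n : Int), Dom_Odd_days x n → Spec_Odd_days x n (Odd_days x n)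

-- ===== LEMMAS AND PROOFS =====

theorem Odd_days_empty (x n : Int) (h : n ≤ x) : Odd_days x n = 0 := by
  unfold Odd_days
  rw [PySem.List.pyRange_one_eq_nil h]
  rfl

theorem Odd_days_step (x m : Int) (h : x ≤ m) :
    Odd_days x (m + 1) = Odd_days x m +
      (if ((PySem.Int.mod m 4 == 0) && !(PySem.Int.mod m 100 == 0)) || (PySem.Int.mod m 400 == 0)
       then (2 : Int) else 1) := by
  unfold Odd_days
  rw [PySem.List.pyRange_one_succ_right h, List.foldl_append]
  simp only [List.foldl_cons, List.foldl_nil]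
  split_ifs <;> ring

theorem step_closed (m : Int) :
    (if ((PySem.Int.mod m 4 == 0) && !(PySem.Int.mod m 100 == 0)) || (PySem.Int.mod m 400 == 0)
     then (2 : Int) else 1)
    = 1 + (m / 4 - (m - 1) / 4) - (m / 100 - (m - 1) / 100) + (m / 400 - (m - 1) / 400) := by
  rw [PySem.Int.mod_eq_emod_of_pos (a := m) (b := 4) (by norm_num),
      PySem.Int.mod_eq_emod_of_pos (a := m) (b := 100) (by norm_num),
      PySem.Int.mod_eq_emod_of_pos (a := m) (b := 400) (by norm_num)]
  simp only [Bool.or_eq_true, Bool.and_eq_true, beq_iff_eq, Bool.not_eq_eq_eq_not,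
    Bool.not_true, beq_eq_false_iff_ne, ne_eq]
  split_ifs with h
  · omega
  · omega

theorem alt_closed (x n : Int) (h : x < n) :
    Odd_days_alt x n = (n - x)
      + ((n - 1) / 4 - (x - 1) / 4)
      - ((n - 1) / 100 - (x - 1) / 100)
      + ((n - 1) / 400 - (x - 1) / 400) := by
  unfold Odd_days_alt
  rw [if_neg (by omega)]
  simp only [PySem.Int.floordiv_eq_ediv_of_pos (by norm_num : (0:Int) < 4),
    PySem.Int.floordiv_eq_ediv_of_pos (by norm_num : (0:Int) < 100),
    PySem.Int.floordiv_eq_ediv_of_pos (by norm_num : (0:Int) < 400)]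

theorem main_aux (x : Int) : ∀ (k : Nat), Odd_days x (x + k) = Odd_days_alt x (x + k) := by
  intro k
  induction k with
  | zero =>
    rw [Odd_days_empty x (x + (0:Nat)) (by simp)]
    unfold Odd_days_alt
    rw [if_pos (by omega)]
  | succ k ih =>
    have hx : x ≤ x + (k : Int) := by omega
    have : (x + ((k + 1 : Nat) : Int)) = (x + (k : Int)) + 1 := by push_cast; ring
    rw [this, Odd_days_step x (x + (k : Int)) hx, ih, step_closed,
        alt_closed x ((x + (k : Int)) + 1) (by omega)]
    by_cases hk : (k : Int) = 0
    · rw [hk]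
      unfold Odd_days_alt
      rw [if_pos (by omega)]
      ring_nf
    · rw [alt_closed x (x + (k : Int)) (by omega)]
      ring_nf

theorem Odd_days_eq_alt (x n : Int) : Odd_days x n = Odd_days_alt x n := by
  by_cases h : n ≤ x
  · rw [Odd_days_empty x n h]
    unfold Odd_days_alt
    rw [if_pos h]
  · have hn : n = x + ((n - x).toNat : Int) := by omega
    rw [hn]
    exact main_aux x (n - x).toNat

-- ===== VERDICT (by name: the statement is the Claim_ definition above) =====
theorem Odd_days_spec : Claim_equal_Odd_days := by
  intro x n _
  exact Odd_days_eq_alt x n
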